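-- pv_equiv track=rewrite | github.com/raxosiris/scify | scify/nlp.py | check_for_non_trees
-- ===== SOURCE A (Python) =====
-- from typing import List
-- from collections import defaultdict
--
-- def check_for_non_trees(rules: List[List[str]]):
--
--     parent_to_children = defaultdict(list)
--     seen = set()
--     has_incoming_edges = set()
--     for (parent, rel, child) in rules:
--         seen.add(parent)
--         seen.add(child)
--         has_incoming_edges.add(child)
--         if parent == child:
--             return None
--         parent_to_children[parent].append((rel, child))
--
--     # Only accept strictly connected trees.
--     roots = seen.difference(has_incoming_edges)
--     if len(roots) != 1:
--         return None
--
--     root = roots.pop()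
--     seen = {root}
--
--     # Step 2: check that the tree doesn't have a loop:
--     def contains_loop(node):
--         has_loop = False
--         for (_, child) in parent_to_children[node]:
--             if child in seen:
--                 return True
--             else:
--                 seen.add(child)
--                 has_loop = contains_loop(child)
--             if has_loop:
--                 break
--
--         return has_loop
--
--     if contains_loop(root):
--         return None
--
--     return root, parent_to_children
-- ===== SOURCE B (Python) =====
-- from typing import List
--
--
-- def check_for_non_trees(rules: List[List[str]]):
--     # Phase 1: build a plain parent -> [(rel, child)] dict and the node sets.
--     children = {}
--     nodes = set()
--     has_incoming = set()
--     for (parent, rel, child) in rules: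
--         nodes.add(parent)
--         nodes.add(child)
--         has_incoming.add(child)
--         if parent == child:
--             return None
--         children.setdefault(parent, []).append((rel, child))
--
--     roots = nodes - has_incoming
--     if len(roots) != 1:
--         return None
--     (root,) = roots
--
--     # Phase 2: iterative DFS with an explicit stack; mark children when their
--     # parent is expanded.  A child met twice means the reachable part is no tree.
--     visited = {root}
--     stack = [root]
--     while stack:
--         node = stack.pop()
--         kids = children.setdefault(node, [])
--         for (_, c) in kids:
--             if c in visited:
--                 return None
--             visited.add(c)
--         stack.extend(c for (_, c) in reversed(kids))
--
--     return root, children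
-- ===== Notes on version B (the rewrite author's own statement) =====
-- stated objective: alternative
-- what changed: The recursive contains_loop DFS (with its closure-mutated seen set and defaultdict side effects) is replaced by an explicit stack-based iterative traversal that marks all children of a node when the node is expanded, on a plain dict built with setdefault; leaf entries are created at pop time so the resulting dict order is the same.
import Mathlib
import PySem

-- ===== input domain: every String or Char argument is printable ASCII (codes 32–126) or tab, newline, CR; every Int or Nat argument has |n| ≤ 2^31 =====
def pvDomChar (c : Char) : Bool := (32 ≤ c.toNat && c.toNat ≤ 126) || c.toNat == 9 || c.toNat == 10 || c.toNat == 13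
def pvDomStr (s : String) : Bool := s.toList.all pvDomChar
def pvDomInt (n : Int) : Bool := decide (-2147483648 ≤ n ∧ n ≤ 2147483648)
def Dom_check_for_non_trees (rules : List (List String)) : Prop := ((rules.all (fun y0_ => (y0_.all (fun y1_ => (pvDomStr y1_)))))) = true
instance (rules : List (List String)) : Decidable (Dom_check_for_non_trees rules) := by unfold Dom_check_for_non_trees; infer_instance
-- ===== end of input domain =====

-- B replaces A's recursive contains_loop DFS by an explicit stack-based iterative traversal
-- over a plain dict (objective: alternative structure, same asymptotic cost).
-- Both ports guard their traversal with fuel ((pvDVals d).length + 2); the fuel is proved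
-- sufficient below (pvCLNode_adequate, and pvMain for the stack loop), so it never alters the result.

abbrev Dct := PySem.Dict String (List (String × String))
abbrev St := PySem.Set String

/-- all child strings stored in the dict's values (only used as a fuel bound for the traversals) -/
def pvDVals (d : Dct) : List String := (d.items.flatMap (fun kv => kv.2)).map Prod.snd

-- ===== PORT A =====
/-- phase 1 of A: the for-loop building parent_to_children / seen / has_incoming_edges
    (defaultdict append = insert of getD ++ [..]); none = the `return None` on a self-loop
    (or a rule that is not a triple, excluded by Pre_). -/
def pvBuildA : List (List String) → Dct → St → St → Option (Dct × St × St)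
  | [], d, seen, inc => some (d, seen, inc)
  | rule :: rest, d, seen, inc =>
    match rule with
    | [parent, rel, child] =>
      let seen1 := PySem.Set.add (PySem.Set.add seen parent) child
      let inc1 := PySem.Set.add inc child
      if parent == child then none
      else pvBuildA rest (d.insert parent (d.getD parent [] ++ [(rel, child)])) seen1 inc1
    | _ => none

mutual
/-- A's recursive contains_loop; the defaultdict access `parent_to_children[node]` also
    inserts an empty entry (setdefault). none = out of fuel (proved unreachable). -/
def pvCLNode : Nat → Dct → St → String → Option (Bool × St × Dct)
  | 0, _, _, _ => none
  | f + 1, d, seen, node => pvCLKids f (d.setdefault node []) seen (d.getD node [])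
termination_by f _ _ _ => (f, 0)
/-- the `for (_, child) in parent_to_children[node]` loop of contains_loop -/
def pvCLKids : Nat → Dct → St → List (String × String) → Option (Bool × St × Dct)
  | _, d, seen, [] => some (false, seen, d)
  | f, d, seen, (_, child) :: rest =>
    if PySem.Set.contains seen child then some (true, seen, d)
    else
      match pvCLNode f d (PySem.Set.add seen child) child with
      | none => none
      | some (b, s1, d1) => if b then some (true, s1, d1) else pvCLKids f d1 s1 rest
termination_by f _ _ kids => (f, kids.length + 1)
end

def check_for_non_trees (rules : List (List String)) : Option (String × (List (String × List (String × String)))) :=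
  match pvBuildA rules PySem.Dict.empty [] [] with
  | none => none
  | some (d, seen, inc) =>
    match PySem.Set.diff seen inc with          -- roots; len(roots) != 1 → None, else pop the root
    | [root] =>
      match pvCLNode ((pvDVals d).length + 2) d (PySem.Set.add [] root) root with
      | none => none                            -- fuel exhausted: proved unreachable (pvCLNode_adequate)
      | some (true, _, _) => none
      | some (false, _, d') => some (root, d'.items)
    | _ => none

-- ===== PORT B =====
/-- phase 1 of B: same loop on a plain dict built with setdefault-append -/
def pvBuildB : List (List String) → Dct → St → St → Option (Dct × St × St)
  | [], d, nodes, inc => some (d, nodes, inc)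
  | rule :: rest, d, nodes, inc =>
    match rule with
    | [parent, rel, child] =>
      let nodes1 := PySem.Set.add (PySem.Set.add nodes parent) child
      let inc1 := PySem.Set.add inc child
      if parent == child then none
      else pvBuildB rest (d.insert parent (d.getD parent [] ++ [(rel, child)])) nodes1 inc1
    | _ => none

/-- `for (_, c) in kids: if c in visited: return None; visited.add(c)` -/
def pvMarkKids : St → List (String × String) → Option St
  | v, [] => some v
  | v, (_, c) :: rest =>
    if PySem.Set.contains v c then none else pvMarkKids (PySem.Set.add v c) rest

/-- B's while loop over the explicit stack (Lean list head = Python list end = top of stack;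
    extend(reversed(kids)) then pop = kids in order, i.e. kids.map Prod.snd ++ rest);
    none = out of fuel (unreachable: pvMain + pvCLNode_adequate evaluate the loop),
    some none = Python's `return None`. -/
def pvLoopB : Nat → Dct → St → List String → Option (Option Dct)
  | 0, _, _, _ => none
  | _ + 1, d, _, [] => some (some d)
  | f + 1, d, v, node :: rest =>
    let d1 := d.setdefault node []
    let kids := d.getD node []
    match pvMarkKids v kids with
    | none => some none
    | some v' => pvLoopB f d1 v' (kids.map Prod.snd ++ rest)

def check_for_non_trees_alt (rules : List (List String)) : Option (String × (List (String × List (String × String)))) :=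
  match pvBuildB rules PySem.Dict.empty [] [] with
  | none => none
  | some (d, nodes, inc) =>
    match PySem.Set.diff nodes inc with
    | [root] =>
      match pvLoopB ((pvDVals d).length + 2) d (PySem.Set.add [] root) [root] with
      | none => none                            -- fuel exhausted: unreachable (pvMain + pvCLNode_adequate)
      | some none => none
      | some (some d') => some (root, d'.items)
    | _ => none

-- ===== PRECONDITION & SPEC =====
/-- a rule `[p, rel, p]` on which both Pythons `return None` without reading further rules -/
def pvIsSelfLoop (r : List String) : Bool := match r with | [p, _, c] => p == c | _ => false

-- Pre_ excludes exactly the inputs on which Python raises (in A and B alike): a rule that is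
-- not a triple makes the unpacking `for (parent, rel, child) in rules` raise ValueError, unless
-- a self-loop rule occurs first (then both return None before reaching the malformed rule).
def Pre_check_for_non_trees (rules : List (List String)) : Prop :=
  ∀ r ∈ rules.takeWhile (fun r => !pvIsSelfLoop r), r.length = 3
instance (rules : List (List String)) : Decidable (Pre_check_for_non_trees rules) := by
  unfold Pre_check_for_non_trees; infer_instance

def pvWitness_check_for_non_trees : List (List String) := [["a", "r", "b"]]

def Spec_check_for_non_trees (rules : List (List String)) (out : Option (String × (List (String × List (String × String))))) : Prop := out = check_for_non_trees_alt rules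
instance (rules : List (List String)) (out : Option (String × (List (String × List (String × String))))) : Decidable (Spec_check_for_non_trees rules out) := by unfold Spec_check_for_non_trees; infer_instance

-- ===== CLAIM (what is proved, stated in full; the proofs are below) =====
def Claim_equal_check_for_non_trees : Prop := ∀ (rules : List (List String)), Dom_check_for_non_trees rules → Pre_check_for_non_trees rules → Spec_check_for_non_trees rules (check_for_non_trees rules)

-- ===== LEMMAS AND PROOFS =====

def pvFresh (dl : List String) (s : List String) : Nat := (dl.toFinset \ s.toFinset).card

theorem pvDVals_setdefault (d : Dct) (n : String) : pvDVals (d.setdefault n []) = pvDVals d := by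
  by_cases hc : d.contains n
  · rw [PySem.Dict.setdefault_of_contains _ _ hc]
  · rw [PySem.Dict.setdefault_of_not_contains _ _ (by simpa using hc)]
    unfold pvDVals
    rw [PySem.Dict.items_insert_of_not_contains _ _ (by simpa using hc)]
    simp

theorem pvMem_dvals_of_mem_getD (d : Dct) (n : String) (p : String × String)
    (hp : p ∈ d.getD n []) : p.2 ∈ pvDVals d := by
  cases hg : d.get? n with
  | none => rw [PySem.Dict.getD_of_get?_eq_none _ _ hg] at hp; cases hp
  | some v =>
    rw [PySem.Dict.getD_of_get?_eq_some _ _ hg] at hp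
    have hm := PySem.Dict.mem_items_of_get?_eq_some d hg
    unfold pvDVals
    simp only [List.mem_map, List.mem_flatMap]
    exact ⟨p, ⟨(n, v), hm, hp⟩, rfl⟩

theorem pvFresh_mono (dl : List String) (s t : List String) (h : ∀ x ∈ s, x ∈ t) :
    pvFresh dl t ≤ pvFresh dl s := by
  apply Finset.card_le_card
  apply Finset.sdiff_subset_sdiff (Finset.Subset.refl _)
  intro x hx
  simp only [List.mem_toFinset] at *
  exact h x hx

theorem pvFresh_add_lt (dl : List String) (s : St) (c : String) (hc : c ∈ dl) (hs : c ∉ s) :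
    pvFresh dl (PySem.Set.add s c) < pvFresh dl s := by
  rw [PySem.Set.add_of_not_mem hs]
  unfold pvFresh
  rw [List.toFinset_append]
  have : (s.toFinset ∪ [c].toFinset) = insert c s.toFinset := by simp
  rw [this, Finset.sdiff_insert]
  have hmem : c ∈ dl.toFinset \ s.toFinset := by
    simp [List.mem_toFinset, hc, hs]
  rw [Finset.card_erase_of_mem hmem]
  have : 0 < (dl.toFinset \ s.toFinset).card := Finset.card_pos.mpr ⟨c, hmem⟩
  omega

theorem pvFresh_le (dl : List String) (s : List String) : pvFresh dl s ≤ dl.length :=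
  le_trans (Finset.card_le_card (Finset.sdiff_subset)) dl.toFinset_card_le

theorem pvFresh_append (dl : List String) (v ks : List String) (hks : ∀ x ∈ ks, x ∈ dl)
    (hnd : ks.Nodup) (hdisj : ∀ x ∈ ks, x ∉ v) :
    pvFresh dl (v ++ ks) + ks.length = pvFresh dl v := by
  unfold pvFresh
  have hsplit : dl.toFinset \ (v.toFinset ∪ ks.toFinset) = (dl.toFinset \ v.toFinset) \ ks.toFinset := by
    ext x; simp [and_assoc]
  rw [List.toFinset_append, hsplit]
  have hsub : ks.toFinset ⊆ dl.toFinset \ v.toFinset := by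
    intro x hx
    simp only [List.mem_toFinset, Finset.mem_sdiff] at *
    exact ⟨hks x hx, hdisj x hx⟩
  rw [Finset.card_sdiff_of_subset hsub, List.toFinset_card_of_nodup hnd]
  have := Finset.card_le_card hsub
  rw [List.toFinset_card_of_nodup hnd] at this
  omega

theorem pvBuild_eq (rules : List (List String)) : ∀ d s i, pvBuildA rules d s i = pvBuildB rules d s i := by
  induction rules with
  | nil => intro d s i; rfl
  | cons r rest ih =>
    intro d s i
    cases r with
    | nil => rfl
    | cons a t =>
      cases t with
      | nil => rfl
      | cons b t2 =>
        cases t2 with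
        | nil => rfl
        | cons c t3 =>
          cases t3 with
          | cons x t4 => rfl
          | nil =>
            show pvBuildA (([a, b, c]) :: rest) d s i = _
            simp only [pvBuildA, pvBuildB]
            split
            · rfl
            · exact ih _ _ _

theorem pvMarkKids_none_mono (kids : List (String × String)) : ∀ (v w : St),
    (∀ x ∈ v, x ∈ w) → pvMarkKids v kids = none → pvMarkKids w kids = none := by
  induction kids with
  | nil => intro v w _ h; simp [pvMarkKids] at h
  | cons p rest ih =>
    intro v w hvw h
    obtain ⟨r, c⟩ := p
    rw [pvMarkKids] at h ⊢
    by_cases hcw : c ∈ w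
    · rw [if_pos ((PySem.Set.contains_iff w c).mpr hcw)]
    · have hcv : c ∉ v := fun hx => hcw (hvw c hx)
      rw [if_neg (fun hx => hcv ((PySem.Set.contains_iff v c).mp hx))] at h
      rw [if_neg (fun hx => hcw ((PySem.Set.contains_iff w c).mp hx))]
      exact ih _ _ (fun x hx => by
        rcases (PySem.Set.mem_add v c x).mp hx with h1 | h1
        · exact (PySem.Set.mem_add w c x).mpr (Or.inl (hvw x h1))
        · exact (PySem.Set.mem_add w c x).mpr (Or.inr h1)) h

theorem pvMarkKids_some (kids : List (String × String)) : ∀ (v v' : St),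
    pvMarkKids v kids = some v' →
    v' = v ++ kids.map Prod.snd ∧ (∀ p ∈ kids, p.2 ∉ v) ∧ (kids.map Prod.snd).Nodup := by
  induction kids with
  | nil => intro v v' h; simp [pvMarkKids] at h; simp [h]
  | cons p rest ih =>
    intro v v' h
    obtain ⟨r, c⟩ := p
    rw [pvMarkKids] at h
    by_cases hcv : c ∈ v
    · rw [if_pos ((PySem.Set.contains_iff v c).mpr hcv)] at h; cases h
    · rw [if_neg (fun hx => hcv ((PySem.Set.contains_iff v c).mp hx))] at h
      obtain ⟨he, hnv, hnd⟩ := ih _ _ h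
      rw [PySem.Set.add_of_not_mem hcv] at he hnv
      refine ⟨by simp [he], ?_, ?_⟩
      · intro p hp
        rcases List.mem_cons.mp hp with hp | hp
        · intro hx; apply hcv; rw [hp] at hx; exact hx
        · have := hnv p hp
          simp only [List.mem_append] at this
          exact fun hx => this (Or.inl hx)
      · simp only [List.map_cons, List.nodup_cons]
        refine ⟨?_, hnd⟩
        intro hc
        obtain ⟨p, hp, hpc⟩ := List.mem_map.mp hc
        have := hnv p hp
        simp [hpc] at this

mutual
theorem pvCLNode_gv (f : Nat) (d : Dct) (s : St) (n : String) (b : Bool) (s' : St) (d' : Dct)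
    (h : pvCLNode f d s n = some (b, s', d')) :
    (∀ x ∈ s, x ∈ s') ∧ pvDVals d' = pvDVals d := by
  match f with
  | 0 => simp [pvCLNode] at h
  | g + 1 =>
    rw [pvCLNode] at h
    have hk := pvCLKids_gv g _ s _ b s' d' h
    exact ⟨hk.1, hk.2.trans (pvDVals_setdefault d n)⟩
termination_by (f, 0)
theorem pvCLKids_gv (f : Nat) (d : Dct) (s : St) (kids : List (String × String)) (b : Bool)
    (s' : St) (d' : Dct) (h : pvCLKids f d s kids = some (b, s', d')) :
    (∀ x ∈ s, x ∈ s') ∧ pvDVals d' = pvDVals d := by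
  match kids with
  | [] =>
    rw [pvCLKids] at h
    obtain ⟨rfl, rfl⟩ : s' = s ∧ d' = d := by
      injection h with h'; exact ⟨(congrArg (·.2.1) h').symm, (congrArg (·.2.2) h').symm⟩
    exact ⟨fun x hx => hx, rfl⟩
  | (r, c) :: rest =>
    rw [pvCLKids] at h
    by_cases hc : PySem.Set.contains s c = true
    · rw [if_pos hc] at h
      obtain ⟨rfl, rfl⟩ : s' = s ∧ d' = d := by
        injection h with h'; exact ⟨(congrArg (·.2.1) h').symm, (congrArg (·.2.2) h').symm⟩
      exact ⟨fun x hx => hx, rfl⟩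
    · rw [if_neg hc] at h
      cases hsub : pvCLNode f d (PySem.Set.add s c) c with
      | none => rw [hsub] at h; cases h
      | some r1 =>
        obtain ⟨b1, s1, d1⟩ := r1
        rw [hsub] at h
        have hgv1 := pvCLNode_gv f d (PySem.Set.add s c) c b1 s1 d1 hsub
        have hgrow1 : ∀ x ∈ s, x ∈ s1 := fun x hx =>
          hgv1.1 x ((PySem.Set.mem_add s c x).mpr (Or.inl hx))
        cases b1 with
        | true =>
          simp only [if_pos] at h
          obtain ⟨rfl, rfl⟩ : s' = s1 ∧ d' = d1 := by
            injection h with h'; exact ⟨(congrArg (·.2.1) h').symm, (congrArg (·.2.2) h').symm⟩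
          exact ⟨hgrow1, hgv1.2⟩
        | false =>
          simp only [Bool.false_eq_true, if_false] at h
          have hk := pvCLKids_gv f d1 s1 rest b s' d' h
          exact ⟨fun x hx => hk.1 x (hgrow1 x hx), hk.2.trans hgv1.2⟩
termination_by (f, kids.length + 1)
end

mutual
theorem pvCLNode_mono (f g : Nat) (hfg : f ≤ g) (d : Dct) (s : St) (n : String)
    (r : Bool × St × Dct) (h : pvCLNode f d s n = some r) : pvCLNode g d s n = some r := by
  match f, g with
  | 0, _ => simp [pvCLNode] at h
  | _ + 1, 0 => omega
  | f' + 1, g' + 1 =>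
    rw [pvCLNode] at h ⊢
    exact pvCLKids_mono f' g' (by omega) _ s _ r h
termination_by (f, 0)
theorem pvCLKids_mono (f g : Nat) (hfg : f ≤ g) (d : Dct) (s : St) (kids : List (String × String))
    (r : Bool × St × Dct) (h : pvCLKids f d s kids = some r) : pvCLKids g d s kids = some r := by
  match kids with
  | [] => rw [pvCLKids] at h ⊢; exact h
  | (rl, c) :: rest =>
    rw [pvCLKids] at h ⊢
    by_cases hc : PySem.Set.contains s c = true
    · rw [if_pos hc] at h ⊢; exact h
    · rw [if_neg hc] at h ⊢
      cases hsub : pvCLNode f d (PySem.Set.add s c) c with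
      | none => rw [hsub] at h; cases h
      | some r1 =>
        rw [hsub] at h
        rw [pvCLNode_mono f g hfg d (PySem.Set.add s c) c r1 hsub]
        obtain ⟨b1, s1, d1⟩ := r1
        cases b1 with
        | true => exact h
        | false =>
          simp only [Bool.false_eq_true, if_false] at h ⊢
          exact pvCLKids_mono f g hfg d1 s1 rest r h
termination_by (f, kids.length + 1)
end

theorem pvCLNode_stab (f g : Nat) (d : Dct) (s : St) (n : String) (r1 r2 : Bool × St × Dct)
    (h1 : pvCLNode f d s n = some r1) (h2 : pvCLNode g d s n = some r2) : r1 = r2 := by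
  rcases le_total f g with hle | hle
  · have := pvCLNode_mono f g hle d s n r1 h1
    rw [this] at h2; exact Option.some.inj h2
  · have := pvCLNode_mono g f hle d s n r2 h2
    rw [this] at h1; exact (Option.some.inj h1).symm

mutual
theorem pvCLNode_adequate (f : Nat) (d : Dct) (s : St) (n : String)
    (h : pvFresh (pvDVals d) s < f) : (pvCLNode f d s n).isSome := by
  match f with
  | 0 => omega
  | g + 1 =>
    rw [pvCLNode]
    apply pvCLKids_adequate g (d.setdefault n []) s (d.getD n [])
    · rw [pvDVals_setdefault]; omega
    · intro p hp
      rw [pvDVals_setdefault]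
      exact pvMem_dvals_of_mem_getD d n p hp
termination_by (f, 0)
theorem pvCLKids_adequate (f : Nat) (d : Dct) (s : St) (kids : List (String × String))
    (h : pvFresh (pvDVals d) s ≤ f) (hk : ∀ p ∈ kids, p.2 ∈ pvDVals d) :
    (pvCLKids f d s kids).isSome := by
  match kids with
  | [] => rw [pvCLKids]; rfl
  | (rl, c) :: rest =>
    rw [pvCLKids]
    by_cases hc : PySem.Set.contains s c = true
    · rw [if_pos hc]; rfl
    · rw [if_neg hc]
      have hcs : c ∉ s := fun hx => hc ((PySem.Set.contains_iff s c).mpr hx)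
      have hcd : c ∈ pvDVals d := hk (rl, c) (List.mem_cons_self) 
      have hlt : pvFresh (pvDVals d) (PySem.Set.add s c) < f :=
        lt_of_lt_of_le (pvFresh_add_lt (pvDVals d) s c hcd hcs) h
      have hsub := pvCLNode_adequate f d (PySem.Set.add s c) c hlt
      cases hs : pvCLNode f d (PySem.Set.add s c) c with
      | none => rw [hs] at hsub; cases hsub
      | some r1 =>
        obtain ⟨b1, s1, d1⟩ := r1
        cases b1 with
        | true => rfl
        | false =>
          simp only [Bool.false_eq_true, if_false]
          have hgv := pvCLNode_gv f d (PySem.Set.add s c) c false s1 d1 hs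
          apply pvCLKids_adequate f d1 s1 rest
          · rw [hgv.2]
            calc pvFresh (pvDVals d) s1 ≤ pvFresh (pvDVals d) (PySem.Set.add s c) :=
                  pvFresh_mono _ _ _ hgv.1
              _ ≤ f := le_of_lt hlt
          · intro p hp; rw [hgv.2]; exact hk p (List.mem_cons_of_mem _ hp)
termination_by (f, kids.length + 1)
end

theorem pvCLKids_true_of_mem (f : Nat) (kids : List (String × String)) :
    ∀ (d : Dct) (s : St) (b : Bool) (s' : St) (d' : Dct),
    pvCLKids f d s kids = some (b, s', d') → (∃ p ∈ kids, p.2 ∈ s) → b = true := by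
  induction kids with
  | nil => intro d s b s' d' h hw; obtain ⟨p, hp, _⟩ := hw; cases hp
  | cons q rest ih =>
    intro d s b s' d' h hw
    obtain ⟨rl, c⟩ := q
    rw [pvCLKids] at h
    by_cases hc : PySem.Set.contains s c = true
    · rw [if_pos hc] at h; injection h with h'; exact (congrArg (·.1) h').symm
    · rw [if_neg hc] at h
      have hcs : c ∉ s := fun hx => hc ((PySem.Set.contains_iff s c).mpr hx)
      cases hs : pvCLNode f d (PySem.Set.add s c) c with
      | none => rw [hs] at h; cases h
      | some r1 =>
        obtain ⟨b1, s1, d1⟩ := r1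
        rw [hs] at h
        cases b1 with
        | true => injection h with h'; exact (congrArg (·.1) h').symm
        | false =>
          simp only [Bool.false_eq_true, if_false] at h
          obtain ⟨p, hp, hps⟩ := hw
          rcases List.mem_cons.mp hp with hp | hp
          · exfalso; apply hcs; rw [hp] at hps; exact hps
          · have hgv := pvCLNode_gv f d (PySem.Set.add s c) c false s1 d1 hs
            exact ih d1 s1 b s' d' h
              ⟨p, hp, hgv.1 _ ((PySem.Set.mem_add s c p.2).mpr (Or.inl hps))⟩

theorem pvCLKids_true_of_mark_none (f : Nat) (kids : List (String × String)) :
    ∀ (d : Dct) (s : St) (b : Bool) (s' : St) (d' : Dct),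
    pvCLKids f d s kids = some (b, s', d') → pvMarkKids s kids = none → b = true := by
  induction kids with
  | nil => intro d s b s' d' h hm; simp [pvMarkKids] at hm
  | cons q rest ih =>
    intro d s b s' d' h hm
    obtain ⟨rl, c⟩ := q
    rw [pvCLKids] at h
    rw [pvMarkKids] at hm
    by_cases hc : PySem.Set.contains s c = true
    · rw [if_pos hc] at h; injection h with h'; exact (congrArg (·.1) h').symm
    · rw [if_neg hc] at h
      rw [if_neg hc] at hm
      cases hs : pvCLNode f d (PySem.Set.add s c) c with
      | none => rw [hs] at h; cases h
      | some r1 =>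
        obtain ⟨b1, s1, d1⟩ := r1
        rw [hs] at h
        cases b1 with
        | true => injection h with h'; exact (congrArg (·.1) h').symm
        | false =>
          simp only [Bool.false_eq_true, if_false] at h
          have hgv := pvCLNode_gv f d (PySem.Set.add s c) c false s1 d1 hs
          exact ih d1 s1 b s' d' h
            (pvMarkKids_none_mono rest (PySem.Set.add s c) s1 hgv.1 hm)

def pvProcA : Nat → Dct → St → List String → Option (Option Dct)
  | _, d, _, [] => some (some d)
  | f, d, s, n :: rest =>
    match pvCLNode f d s n with
    | none => none
    | some (true, _, _) => some none
    | some (false, s', d') => pvProcA f d' s' rest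

mutual
theorem pvCLNode_congr (f : Nat) (d : Dct) (s t : St) (n : String)
    (hst : ∀ x, x ∈ s ↔ x ∈ t) :
    (pvCLNode f d s n = none ∧ pvCLNode f d t n = none) ∨
    ∃ b s' t' d', pvCLNode f d s n = some (b, s', d') ∧ pvCLNode f d t n = some (b, t', d') ∧
      (∀ x, x ∈ s' ↔ x ∈ t') := by
  match f with
  | 0 => exact Or.inl ⟨by rw [pvCLNode], by rw [pvCLNode]⟩
  | g + 1 =>
    rw [pvCLNode, pvCLNode]
    exact pvCLKids_congr g _ s t _ hst
termination_by (f, 0)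
theorem pvCLKids_congr (f : Nat) (d : Dct) (s t : St) (kids : List (String × String))
    (hst : ∀ x, x ∈ s ↔ x ∈ t) :
    (pvCLKids f d s kids = none ∧ pvCLKids f d t kids = none) ∨
    ∃ b s' t' d', pvCLKids f d s kids = some (b, s', d') ∧ pvCLKids f d t kids = some (b, t', d') ∧
      (∀ x, x ∈ s' ↔ x ∈ t') := by
  match kids with
  | [] =>
    rw [pvCLKids, pvCLKids]
    exact Or.inr ⟨false, s, t, d, rfl, rfl, hst⟩
  | (rl, c) :: rest =>
    rw [pvCLKids, pvCLKids]
    by_cases hc : c ∈ s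
    · rw [if_pos ((PySem.Set.contains_iff s c).mpr hc),
        if_pos ((PySem.Set.contains_iff t c).mpr ((hst c).mp hc))]
      exact Or.inr ⟨true, s, t, d, rfl, rfl, hst⟩
    · rw [if_neg (fun hx => hc ((PySem.Set.contains_iff s c).mp hx)),
        if_neg (fun hx => hc ((hst c).mpr ((PySem.Set.contains_iff t c).mp hx)))]
      have hadd : ∀ x, x ∈ PySem.Set.add s c ↔ x ∈ PySem.Set.add t c := by
        intro x
        rw [PySem.Set.mem_add, PySem.Set.mem_add]
        exact or_congr_left (hst x)
      rcases pvCLNode_congr f d (PySem.Set.add s c) (PySem.Set.add t c) c hadd with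
        ⟨h1, h2⟩ | ⟨b1, s1, t1, d1, h1, h2, h12⟩
      · rw [h1, h2]; exact Or.inl ⟨rfl, rfl⟩
      · rw [h1, h2]
        cases b1 with
        | true => exact Or.inr ⟨true, s1, t1, d1, rfl, rfl, h12⟩
        | false =>
          simp only [Bool.false_eq_true, if_false]
          exact pvCLKids_congr f d1 s1 t1 rest h12
termination_by (f, kids.length + 1)
end

theorem pvProcA_congr (stack : List String) : ∀ (f : Nat) (d : Dct) (s t : St),
    (∀ x, x ∈ s ↔ x ∈ t) → pvProcA f d s stack = pvProcA f d t stack := by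
  induction stack with
  | nil => intro f d s t _; rfl
  | cons n rest ih =>
    intro f d s t hst
    rw [pvProcA, pvProcA]
    rcases pvCLNode_congr f d s t n hst with ⟨h1, h2⟩ | ⟨b, s', t', d', h1, h2, h12⟩
    · rw [h1, h2]
    · rw [h1, h2]
      cases b with
      | true => rfl
      | false => exact ih f d' s' t' h12

mutual
theorem pvCLNode_frame (f : Nat) (d : Dct) (s t : St) (n : String) (b : Bool) (s' : St) (d' : Dct)
    (h : pvCLNode f d s n = some (b, s', d')) (hst : ∀ x ∈ s, x ∈ t) :
    (b = true → ∃ t' d'', pvCLNode f d t n = some (true, t', d'')) ∧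
    (b = false →
      ((∃ x ∈ t, x ∉ s ∧ x ∈ s') → ∃ t' d'', pvCLNode f d t n = some (true, t', d'')) ∧
      ((¬ ∃ x ∈ t, x ∉ s ∧ x ∈ s') →
        ∃ t', pvCLNode f d t n = some (false, t', d') ∧ (∀ x, x ∈ t' ↔ x ∈ t ∨ x ∈ s'))) := by
  match f with
  | 0 => rw [pvCLNode] at h; cases h
  | g + 1 =>
    rw [pvCLNode] at h ⊢
    exact pvCLKids_frame g _ s t _ b s' d' h hst
termination_by (f, 0)
theorem pvCLKids_frame (f : Nat) (d : Dct) (s t : St) (kids : List (String × String)) (b : Bool)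
    (s' : St) (d' : Dct)
    (h : pvCLKids f d s kids = some (b, s', d')) (hst : ∀ x ∈ s, x ∈ t) :
    (b = true → ∃ t' d'', pvCLKids f d t kids = some (true, t', d'')) ∧
    (b = false →
      ((∃ x ∈ t, x ∉ s ∧ x ∈ s') → ∃ t' d'', pvCLKids f d t kids = some (true, t', d'')) ∧
      ((¬ ∃ x ∈ t, x ∉ s ∧ x ∈ s') →
        ∃ t', pvCLKids f d t kids = some (false, t', d') ∧ (∀ x, x ∈ t' ↔ x ∈ t ∨ x ∈ s'))) := by
  match kids with
  | [] =>
    rw [pvCLKids] at h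
    obtain ⟨hb, hs, hd⟩ : b = false ∧ s' = s ∧ d' = d := by
      simp at h; exact ⟨h.1, h.2.1.symm, h.2.2.symm⟩
    subst hb; subst hs; subst hd
    constructor
    · intro hb; exact nomatch hb
    · intro _
      constructor
      · rintro ⟨x, hxt, hxs, hxs'⟩; exact absurd hxs' hxs
      · intro _
        refine ⟨t, by rw [pvCLKids], fun x => ⟨fun hx => Or.inl hx, fun hx => ?_⟩⟩
        rcases hx with hx | hx
        · exact hx
        · exact hst x hx
  | (rl, c) :: rest =>
    rw [pvCLKids] at h
    by_cases hcs : c ∈ s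
    · -- immediate loop detection in the s-run
      rw [if_pos ((PySem.Set.contains_iff s c).mpr hcs)] at h
      obtain ⟨hb, hs, hd⟩ : b = true ∧ s' = s ∧ d' = d := by
        simp at h; exact ⟨h.1, h.2.1.symm, h.2.2.symm⟩
      subst hb
      refine ⟨fun _ => ⟨t, d, ?_⟩, fun hb => nomatch hb⟩
      rw [pvCLKids, if_pos ((PySem.Set.contains_iff t c).mpr (hst c hcs))]
    · rw [if_neg (fun hx => hcs ((PySem.Set.contains_iff s c).mp hx))] at h
      cases hsub : pvCLNode f d (PySem.Set.add s c) c with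
      | none => rw [hsub] at h; cases h
      | some r1 =>
        obtain ⟨b1, s1, d1⟩ := r1
        rw [hsub] at h
        have hgv1 := pvCLNode_gv f d (PySem.Set.add s c) c b1 s1 d1 hsub
        have hcs1 : c ∈ s1 := hgv1.1 c ((PySem.Set.mem_add s c c).mpr (Or.inr rfl))
        have hss1 : ∀ x ∈ s, x ∈ s1 := fun x hx =>
          hgv1.1 x ((PySem.Set.mem_add s c x).mpr (Or.inl hx))
        by_cases hct : c ∈ t
        · -- the t-run detects a loop at once
          have htrun : pvCLKids f d t ((rl, c) :: rest) = some (true, t, d) := by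
            rw [pvCLKids, if_pos ((PySem.Set.contains_iff t c).mpr hct)]
          refine ⟨fun _ => ⟨t, d, htrun⟩, fun hb => ⟨fun _ => ⟨t, d, htrun⟩, fun hno => ?_⟩⟩
          -- with b = false we have c ∈ t, c ∉ s, c ∈ s': a collision, contradiction
          exfalso; apply hno
          subst hb
          cases b1 with
          | true => simp at h
          | false =>
            simp only [Bool.false_eq_true, if_false] at h
            have := (pvCLKids_gv f d1 s1 rest false s' d' h).1
            exact ⟨c, hct, hcs, this c hcs1⟩
        · -- c is fresh in both runs
          have htneg : PySem.Set.contains t c ≠ true :=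
            fun hx => hct ((PySem.Set.contains_iff t c).mp hx)
          have hstadd : ∀ x ∈ PySem.Set.add s c, x ∈ PySem.Set.add t c := by
            intro x hx
            rcases (PySem.Set.mem_add s c x).mp hx with hx | hx
            · exact (PySem.Set.mem_add t c x).mpr (Or.inl (hst x hx))
            · exact (PySem.Set.mem_add t c x).mpr (Or.inr hx)
          have hIH := pvCLNode_frame f d (PySem.Set.add s c) (PySem.Set.add t c) c b1 s1 d1 hsub hstadd
          cases b1 with
          | true =>
            -- the s-run stops with True right below c
            obtain ⟨hb, hs, hd⟩ : b = true ∧ s' = s1 ∧ d' = d1 := by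
              simp at h
              exact ⟨h.1, h.2.1.symm, h.2.2.symm⟩
            subst hb
            obtain ⟨t1, d2, ht1⟩ := hIH.1 rfl
            have htrun : pvCLKids f d t ((rl, c) :: rest) = some (true, t1, d2) := by
              rw [pvCLKids, if_neg htneg, ht1]; rfl
            exact ⟨fun _ => ⟨t1, d2, htrun⟩, fun hb => nomatch hb⟩
          | false =>
            simp only [Bool.false_eq_true, if_false] at h
            -- tail of the s-run
            have hgrow_tail := (pvCLKids_gv f d1 s1 rest b s' d' h).1
            by_cases hP1 : ∃ x ∈ PySem.Set.add t c, x ∉ PySem.Set.add s c ∧ x ∈ s1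
            · -- the t-subrun turns into a loop detection
              obtain ⟨t1, d2, ht1⟩ := (hIH.2 rfl).1 hP1
              have htrun : pvCLKids f d t ((rl, c) :: rest) = some (true, t1, d2) := by
                rw [pvCLKids, if_neg htneg, ht1]; rfl
              -- and the collision witness also witnesses the outer collision
              obtain ⟨x, hxt, hxs, hxs1⟩ := hP1
              have hxc : x ≠ c := fun hxc => hxs ((PySem.Set.mem_add s c x).mpr (Or.inr hxc))
              have hxt' : x ∈ t := by
                rcases (PySem.Set.mem_add t c x).mp hxt with hx | hx
                · exact hx
                · exact absurd hx hxc
              have hxns : x ∉ s := fun hx => hxs ((PySem.Set.mem_add s c x).mpr (Or.inl hx))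
              refine ⟨fun _ => ⟨t1, d2, htrun⟩, fun hb => ⟨fun _ => ⟨t1, d2, htrun⟩, fun hno => ?_⟩⟩
              exact absurd ⟨x, hxt', hxns, hgrow_tail x hxs1⟩ hno
            · -- the t-subrun mirrors the s-subrun exactly
              obtain ⟨t1, ht1, hchar1⟩ := (hIH.2 rfl).2 hP1
              have hs1t1 : ∀ x ∈ s1, x ∈ t1 := fun x hx => (hchar1 x).mpr (Or.inr hx)
              have htail := pvCLKids_frame f d1 s1 t1 rest b s' d' h hs1t1
              -- inner collision ↔ outer collision
              have hQP : ∀ (hQ : ∃ x ∈ t, x ∉ s ∧ x ∈ s'), ∃ x ∈ t1, x ∉ s1 ∧ x ∈ s' := by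
                rintro ⟨x, hxt, hxns, hxs'⟩
                have hxns1 : x ∉ s1 := by
                  intro hx
                  apply hP1
                  refine ⟨x, (PySem.Set.mem_add t c x).mpr (Or.inl hxt), ?_, hx⟩
                  intro hxsc
                  rcases (PySem.Set.mem_add s c x).mp hxsc with h1 | h1
                  · exact hxns h1
                  · rw [h1] at hxt; exact hct hxt
                exact ⟨x, (hchar1 x).mpr (Or.inl ((PySem.Set.mem_add t c x).mpr (Or.inl hxt))),
                  hxns1, hxs'⟩
              have hPQ : ∀ (hP : ∃ x ∈ t1, x ∉ s1 ∧ x ∈ s'), ∃ x ∈ t, x ∉ s ∧ x ∈ s' := by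
                rintro ⟨x, hxt1, hxns1, hxs'⟩
                have hxtc : x ∈ PySem.Set.add t c := by
                  rcases (hchar1 x).mp hxt1 with h1 | h1
                  · exact h1
                  · exact absurd h1 hxns1
                have hxc : x ≠ c := fun hxc => hxns1 (by rw [hxc]; exact hcs1)
                have hxt : x ∈ t := by
                  rcases (PySem.Set.mem_add t c x).mp hxtc with h1 | h1
                  · exact h1
                  · exact absurd h1 hxc
                have hxns : x ∉ s := fun hx => hxns1 (hss1 x hx)
                exact ⟨x, hxt, hxns, hxs'⟩
              constructor
              · -- b = true
                intro hb
                obtain ⟨t2, d3, ht2⟩ := htail.1 hb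
                refine ⟨t2, d3, ?_⟩
                rw [pvCLKids, if_neg htneg, ht1]
                simp only [Bool.false_eq_true, if_false]
                exact ht2
              · intro hb
                constructor
                · intro hQ
                  obtain ⟨t2, d3, ht2⟩ := (htail.2 hb).1 (hQP hQ)
                  refine ⟨t2, d3, ?_⟩
                  rw [pvCLKids, if_neg htneg, ht1]
                  simp only [Bool.false_eq_true, if_false]
                  exact ht2
                · intro hno
                  have hnoP : ¬ ∃ x ∈ t1, x ∉ s1 ∧ x ∈ s' := fun hP => hno (hPQ hP)
                  obtain ⟨t2, ht2, hchar2⟩ := (htail.2 hb).2 hnoP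
                  refine ⟨t2, ?_, ?_⟩
                  · rw [pvCLKids, if_neg htneg, ht1]
                    simp only [Bool.false_eq_true, if_false]
                    exact ht2
                  · intro x
                    rw [hchar2 x]
                    constructor
                    · rintro (hx | hx)
                      · rcases (hchar1 x).mp hx with h1 | h1
                        · rcases (PySem.Set.mem_add t c x).mp h1 with h2 | h2
                          · exact Or.inl h2
                          · rw [h2]; exact Or.inr (hgrow_tail c hcs1)
                        · exact Or.inr (hgrow_tail x h1)
                      · exact Or.inr hx
                    · rintro (hx | hx)
                      · exact Or.inl ((hchar1 x).mpr (Or.inl ((PySem.Set.mem_add t c x).mpr (Or.inl hx))))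
                      · exact Or.inr hx
termination_by (f, kids.length + 1)
end

theorem pvProcA_kids (K : List (String × String)) :
    ∀ (rest : List String) (h f : Nat) (d : Dct) (v t : St) (b : Bool) (s' : St) (d'' : Dct),
    pvCLKids h d v K = some (b, s', d'') →
    (∀ p ∈ K, p.2 ∉ v) → (K.map Prod.snd).Nodup →
    (∀ p ∈ K, p.2 ∈ pvDVals d) →
    (∀ x, x ∈ t ↔ x ∈ v ∨ x ∈ K.map Prod.snd) →
    pvFresh (pvDVals d) v ≤ f →
    pvProcA f d t (K.map Prod.snd ++ rest) = (if b then some none else pvProcA f d'' s' rest) := by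
  induction K with
  | nil =>
    intro rest h f d v t b s' d'' hrun hnv hnd hdv hchar hfuel
    rw [pvCLKids] at hrun
    obtain ⟨hb, hs, hd⟩ : b = false ∧ s' = v ∧ d'' = d := by
      simp at hrun; exact ⟨hrun.1, hrun.2.1.symm, hrun.2.2.symm⟩
    subst hb
    simp only [List.map_nil, List.nil_append, Bool.false_eq_true, if_false]
    rw [hs, hd]
    exact pvProcA_congr rest f d t v (fun x => by rw [hchar x]; simp)
  | cons q K' ih =>
    intro rest h f d v t b s' d'' hrun hnv hnd hdv hchar hfuel
    obtain ⟨rl, c⟩ := q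
    rw [pvCLKids] at hrun
    have hcv : c ∉ v := hnv (rl, c) List.mem_cons_self
    rw [if_neg (fun hx => hcv ((PySem.Set.contains_iff v c).mp hx))] at hrun
    cases hsub : pvCLNode h d (PySem.Set.add v c) c with
    | none => rw [hsub] at hrun; cases hrun
    | some r1 =>
      obtain ⟨b1, s1, d1⟩ := r1
      rw [hsub] at hrun
      -- lift the subrun to fuel f
      have hcd : c ∈ pvDVals d := hdv (rl, c) List.mem_cons_self
      have hfr : pvFresh (pvDVals d) (PySem.Set.add v c) < f :=
        lt_of_lt_of_le (pvFresh_add_lt (pvDVals d) v c hcd hcv) hfuel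
      have hsubf : pvCLNode f d (PySem.Set.add v c) c = some (b1, s1, d1) := by
        have hs := pvCLNode_adequate f d (PySem.Set.add v c) c hfr
        cases hs2 : pvCLNode f d (PySem.Set.add v c) c with
        | none => rw [hs2] at hs; cases hs
        | some r2 => rw [pvCLNode_stab f h d (PySem.Set.add v c) c r2 (b1, s1, d1) hs2 hsub]
      have hgv1 := pvCLNode_gv h d (PySem.Set.add v c) c b1 s1 d1 hsub
      have hvc_t : ∀ x ∈ PySem.Set.add v c, x ∈ t := by
        intro x hx
        rcases (PySem.Set.mem_add v c x).mp hx with hx | hx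
        · exact (hchar x).mpr (Or.inl hx)
        · exact (hchar x).mpr (Or.inr (by rw [hx]; simp))
      have hframe := pvCLNode_frame f d (PySem.Set.add v c) t c b1 s1 d1 hsubf hvc_t
      -- unfold the LHS one step
      have hLHS : pvProcA f d t ((List.map Prod.snd ((rl, c) :: K')) ++ rest)
          = (match pvCLNode f d t c with
             | none => none
             | some (true, _, _) => some none
             | some (false, t1, dd) => pvProcA f dd t1 (List.map Prod.snd K' ++ rest)) := by
        simp only [List.map_cons, List.cons_append]
        rw [pvProcA]
      cases b1 with
      | true =>
        -- the real run stops with True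
        obtain ⟨hb, hs, hd⟩ : b = true ∧ s' = s1 ∧ d'' = d1 := by
          simp at hrun; exact ⟨hrun.1, hrun.2.1.symm, hrun.2.2.symm⟩
        subst hb
        obtain ⟨t1, d2, ht1⟩ := hframe.1 rfl
        rw [hLHS, ht1]
        rfl
      | false =>
        simp only [Bool.false_eq_true, if_false] at hrun
        have hgrow_tail := (pvCLKids_gv h d1 s1 K' b s' d'' hrun).1
        have hnd' : (K'.map Prod.snd).Nodup := (List.nodup_cons.mp (by simpa using hnd)).2
        have hcK' : c ∉ K'.map Prod.snd := (List.nodup_cons.mp (by simpa using hnd)).1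
        by_cases hP : ∃ x ∈ t, x ∉ PySem.Set.add v c ∧ x ∈ s1
        · -- a later sibling is reached below c: both sides report a loop
          obtain ⟨t1, d2, ht1⟩ := (hframe.2 rfl).1 hP
          rw [hLHS, ht1]
          -- and the real tail run must return True as well
          obtain ⟨x, hxt, hxvc, hxs1⟩ := hP
          have hxK' : x ∈ K'.map Prod.snd := by
            rcases (hchar x).mp hxt with hx | hx
            · exact absurd ((PySem.Set.mem_add v c x).mpr (Or.inl hx)) hxvc
            · rw [List.map_cons] at hx
              rcases List.mem_cons.mp hx with hx1 | hx1
              · exact absurd ((PySem.Set.mem_add v c x).mpr (Or.inr hx1)) hxvc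
              · exact hx1
          obtain ⟨p, hp, hpx⟩ := List.mem_map.mp hxK'
          have hb : b = true := pvCLKids_true_of_mem h K' d1 s1 b s' d'' hrun ⟨p, hp, by rw [hpx]; exact hxs1⟩
          rw [hb]
          rfl
        · -- no interference: the t-subrun returns the same dict and continues
          obtain ⟨t1, ht1, hchar1⟩ := (hframe.2 rfl).2 hP
          rw [hLHS, ht1]
          have hcs1 : c ∈ s1 := hgv1.1 c ((PySem.Set.mem_add v c c).mpr (Or.inr rfl))
          have hvs1 : ∀ x ∈ v, x ∈ s1 := fun x hx =>
            hgv1.1 x ((PySem.Set.mem_add v c x).mpr (Or.inl hx))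
          -- apply the induction hypothesis on K'
          apply ih rest h f d1 s1 t1 b s' d'' hrun
          · -- children of K' not yet in s1
            intro p hp hps1
            apply hP
            refine ⟨p.2, (hchar p.2).mpr (Or.inr (List.mem_map.mpr ⟨p, List.mem_cons_of_mem _ hp, rfl⟩)), ?_, hps1⟩
            intro hx
            rcases (PySem.Set.mem_add v c p.2).mp hx with hx | hx
            · exact hnv p (List.mem_cons_of_mem _ hp) hx
            · exact hcK' (by rw [← hx]; exact List.mem_map.mpr ⟨p, hp, rfl⟩)
          · exact hnd'
          · intro p hp; rw [hgv1.2]; exact hdv p (List.mem_cons_of_mem _ hp)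
          · -- t1 ≃ s1 ∪ children K'
            intro x
            rw [hchar1 x]
            constructor
            · rintro (hx | hx)
              · rcases (hchar x).mp hx with hx1 | hx1
                · exact Or.inl (hvs1 x hx1)
                · rw [List.map_cons] at hx1
                  rcases List.mem_cons.mp hx1 with hx2 | hx2
                  · exact Or.inl (by rw [hx2]; exact hcs1)
                  · exact Or.inr hx2
              · exact Or.inl hx
            · rintro (hx | hx)
              · exact Or.inr hx
              · exact Or.inl ((hchar x).mpr (Or.inr (by rw [List.map_cons]; exact List.mem_cons_of_mem _ hx)))
          · rw [hgv1.2]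
            exact le_trans (pvFresh_mono (pvDVals d) v s1 hvs1) hfuel

theorem pvMain (g : Nat) : ∀ (f : Nat) (d : Dct) (v : St) (stack : List String),
    stack.length + pvFresh (pvDVals d) v < g → pvFresh (pvDVals d) v < f →
    pvLoopB g d v stack = pvProcA f d v stack := by
  induction g with
  | zero => intro f d v stack h; omega
  | succ g' ih =>
    intro f d v stack hg hf
    match stack with
    | [] => rw [pvLoopB, pvProcA]
    | node :: rest =>
      rw [pvLoopB, pvProcA]
      -- the node's expansion in A's run
      have hnode := pvCLNode_adequate f d v node hf
      cases hn : pvCLNode f d v node with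
      | none => rw [hn] at hnode; cases hnode
      | some r =>
        obtain ⟨b, s', d'⟩ := r
        have hfpos : 0 < f := by omega
        obtain ⟨f', rfl⟩ : ∃ f', f = f' + 1 := ⟨f - 1, by omega⟩
        rw [pvCLNode] at hn
        cases hm : pvMarkKids v (d.getD node []) with
        | none =>
          have hb : b = true := pvCLKids_true_of_mark_none f' (d.getD node [])
            (d.setdefault node []) v b s' d' hn hm
          rw [hb]
        | some v' =>
          obtain ⟨hv', hnv, hnd⟩ := pvMarkKids_some (d.getD node []) v v' hm
          have hks : ∀ x ∈ (d.getD node []).map Prod.snd, x ∈ pvDVals d := by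
            intro x hx
            obtain ⟨p, hp, hpx⟩ := List.mem_map.mp hx
            rw [← hpx]; exact pvMem_dvals_of_mem_getD d node p hp
          have hdisj : ∀ x ∈ (d.getD node []).map Prod.snd, x ∉ v := by
            intro x hx
            obtain ⟨p, hp, hpx⟩ := List.mem_map.mp hx
            rw [← hpx]; exact hnv p hp
          have hfr := pvFresh_append (pvDVals d) v ((d.getD node []).map Prod.snd) hks hnd hdisj
          -- step the stack loop and convert it with the induction hypothesis
          have hstep : pvLoopB g' (d.setdefault node []) v' ((d.getD node []).map Prod.snd ++ rest)
              = pvProcA (f' + 1) (d.setdefault node []) v' ((d.getD node []).map Prod.snd ++ rest) := by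
            apply ih
            · rw [pvDVals_setdefault, hv']
              simp only [List.length_append, List.length_map, List.length_cons] at *
              omega
            · rw [pvDVals_setdefault, hv']
              simp only [List.length_cons] at hg
              omega
          -- and identify the continuation with A's kids loop
          have hkids := pvProcA_kids (d.getD node []) rest f' (f' + 1) (d.setdefault node [])
            v v' b s' d' hn ?_ hnd ?_ ?_ ?_
          · have hgoal := hstep.trans hkids
            cases b with
            | true => exact hgoal
            | false => exact hgoal
          · intro p hp; exact hnv p hp
          · intro p hp
            rw [pvDVals_setdefault]
            exact pvMem_dvals_of_mem_getD d node p hp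
          · intro x; rw [hv']; simp
          · rw [pvDVals_setdefault]; omega

theorem final_eq (rules : List (List String)) :
    check_for_non_trees rules = check_for_non_trees_alt rules := by
  unfold check_for_non_trees check_for_non_trees_alt
  rw [← pvBuild_eq rules PySem.Dict.empty [] []]
  cases hbuild : pvBuildA rules PySem.Dict.empty [] [] with
  | none => rfl
  | some r =>
    obtain ⟨d, seen, inc⟩ := r
    show (match PySem.Set.diff seen inc with
          | [root] =>
            match pvCLNode ((pvDVals d).length + 2) d (PySem.Set.add [] root) root with
            | none => none
            | some (true, _, _) => none
            | some (false, _, d') => some (root, d'.items)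
          | _ => none) =
         (match PySem.Set.diff seen inc with
          | [root] =>
            match pvLoopB ((pvDVals d).length + 2) d (PySem.Set.add [] root) [root] with
            | none => none
            | some none => none
            | some (some d') => some (root, d'.items)
          | _ => none)
    cases hroots : PySem.Set.diff seen inc with
    | nil => rfl
    | cons root rts =>
      cases rts with
      | cons x xs => rfl
      | nil =>
        show (match pvCLNode ((pvDVals d).length + 2) d (PySem.Set.add [] root) root with
              | none => none
              | some (true, _, _) => none
              | some (false, _, d') => some (root, d'.items)) =
             (match pvLoopB ((pvDVals d).length + 2) d (PySem.Set.add [] root) [root] with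
              | none => none
              | some none => none
              | some (some d') => some (root, d'.items))
        have hfr : pvFresh (pvDVals d) (PySem.Set.add [] root) < (pvDVals d).length + 2 :=
          lt_of_le_of_lt (pvFresh_le _ _) (by omega)
        have hmain := pvMain ((pvDVals d).length + 2) ((pvDVals d).length + 2) d
          (PySem.Set.add [] root) [root]
          (by have := pvFresh_le (pvDVals d) (PySem.Set.add [] root)
              simp only [List.length_cons, List.length_nil]
              omega) hfr
        have hnode := pvCLNode_adequate ((pvDVals d).length + 2) d (PySem.Set.add [] root) root hfr
        cases hn : pvCLNode ((pvDVals d).length + 2) d (PySem.Set.add [] root) root with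
        | none => rw [hn] at hnode; cases hnode
        | some r1 =>
          obtain ⟨bb, s', d'⟩ := r1
          rw [hmain]
          have hpa : pvProcA ((pvDVals d).length + 2) d (PySem.Set.add [] root) [root]
              = (match pvCLNode ((pvDVals d).length + 2) d (PySem.Set.add [] root) root with
                 | none => none
                 | some (true, _, _) => some none
                 | some (false, s2, d2) => pvProcA ((pvDVals d).length + 2) d2 s2 []) := rfl
          rw [hpa, hn]
          cases bb with
          | true => rfl
          | false => rfl

-- ===== VERDICT (by name: the statement is the Claim_ definition above) =====
theorem check_for_non_trees_spec : Claim_equal_check_for_non_trees := by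
  intro rules _hdom _hpre
  unfold Spec_check_for_non_trees
  exact final_eq rules
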